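-- pv_equiv track=rewrite | github.com/MegaGiciorPortas/WDI-Zadania | 01-zmienne/1.42.v2.py | cykl_reszty_liczb
-- ===== SOURCE A (Python) =====
-- def cykl_reszty_liczb(n):
--     liczba_cykli = n // 10
--     if liczba_cykli % 2 == 0:
--         ostatnia = 1
--     else:
--         ostatnia = 9
--
--     start = liczba_cykli * 10 + 1
--     for i in range(start, n + 1):
--         last_digit = i % 10
--         if not last_digit % 2 == 0 and not last_digit % 5 == 0:
--             ostatnia = (ostatnia * last_digit) % 10
--
--     return ostatnia
-- ===== SOURCE B (Python) =====
-- # The result depends only on n mod 20: parity of n//10 is (n%20)//10 and the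
-- # partial-decade product depends only on n%10.  Precomputed table, no loop.
-- _TABLE = (1, 1, 1, 3, 3, 3, 3, 1, 1, 9, 9, 9, 9, 7, 7, 7, 7, 9, 9, 1)
--
-- def cykl_reszty_liczb(n):
--     return _TABLE[n % 20]
-- ===== Notes on version B (the rewrite author's own statement) =====
-- stated objective: simpler
-- what changed: B replaces A's parity branch plus scan of the partial decade by a single lookup in a precomputed twenty-entry table, using that the result is periodic in n with period twenty.
import Mathlib
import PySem

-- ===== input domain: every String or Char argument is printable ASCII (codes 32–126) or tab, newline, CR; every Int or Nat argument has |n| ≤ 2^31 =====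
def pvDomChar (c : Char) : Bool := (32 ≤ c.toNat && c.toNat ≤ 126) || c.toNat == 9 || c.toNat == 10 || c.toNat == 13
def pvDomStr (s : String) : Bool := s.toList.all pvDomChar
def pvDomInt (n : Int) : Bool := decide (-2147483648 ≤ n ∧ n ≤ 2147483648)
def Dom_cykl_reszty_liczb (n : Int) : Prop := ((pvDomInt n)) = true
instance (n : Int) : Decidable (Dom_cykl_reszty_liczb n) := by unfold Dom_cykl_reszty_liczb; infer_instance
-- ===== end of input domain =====

-- B replaces A's parity branch plus partial-decade scan by one lookup in a precomputed
-- twenty-entry table (the function is periodic in n with period twenty); objective: simpler.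

-- ===== PORT A =====
def cykl_reszty_liczb (n : Int) : Int :=
  let liczba_cykli := PySem.Int.floordiv n 10
  let ostatnia : Int := if PySem.Int.mod liczba_cykli 2 = 0 then 1 else 9
  let start := liczba_cykli * 10 + 1
  (PySem.List.pyRange start (n + 1) 1).foldl
    (fun ostatnia i =>
      let last_digit := PySem.Int.mod i 10
      if ¬ PySem.Int.mod last_digit 2 = 0 ∧ ¬ PySem.Int.mod last_digit 5 = 0 then
        PySem.Int.mod (ostatnia * last_digit) 10
      else ostatnia) ostatnia

-- ===== PORT B =====
def pvTable : List Int := [1, 1, 1, 3, 3, 3, 3, 1, 1, 9, 9, 9, 9, 7, 7, 7, 7, 9, 9, 1]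

def cykl_reszty_liczb_alt (n : Int) : Int :=
  -- _TABLE[n % 20]; the index n % 20 is always in 0..19, so pyGet? never returns none
  (PySem.List.pyGet? pvTable (PySem.Int.mod n 20)).getD 0

-- ===== PRECONDITION & SPEC =====
def Spec_cykl_reszty_liczb (n : Int) (out : Int) : Prop := out = cykl_reszty_liczb_alt n
instance (n : Int) (out : Int) : Decidable (Spec_cykl_reszty_liczb n out) := by unfold Spec_cykl_reszty_liczb; infer_instance

-- ===== CLAIM (what is proved, stated in full; the proofs are below) =====
def Claim_equal_cykl_reszty_liczb : Prop := ∀ (n : Int), Dom_cykl_reszty_liczb n → Spec_cykl_reszty_liczb n (cykl_reszty_liczb n)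

-- ===== LEMMAS AND PROOFS =====

-- last digit of 10*k + j is the last digit of j
lemma mod10_shift (k j : Int) : PySem.Int.mod (k * 10 + j) 10 = PySem.Int.mod j 10 := by
  rw [PySem.Int.mod_eq_emod_of_pos (by norm_num), PySem.Int.mod_eq_emod_of_pos (by norm_num)]
  omega

-- the partial decade 10k+1 .. 10k+r is the shifted range 1 .. r
lemma range_shift (k r : Int) :
    PySem.List.pyRange (k * 10 + 1) (k * 10 + r + 1) 1 =
      (PySem.List.pyRange 1 (r + 1) 1).map (fun j => k * 10 + j) := by
  simp only [PySem.List.pyRange_one, List.map_map]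
  have : k * 10 + r + 1 - (k * 10 + 1) = r + 1 - 1 := by ring
  rw [this]
  apply List.map_congr_left
  intro x _
  simp
  ring

-- the core identity, with the decade count k and the remainder r made explicit
lemma aux (k r : Int) (h0 : 0 ≤ r) (h1 : r < 10) :
    cykl_reszty_liczb (k * 10 + r) = cykl_reszty_liczb_alt (k * 10 + r) := by
  have hfd : PySem.Int.floordiv (k * 10 + r) 10 = k := by
    rw [PySem.Int.floordiv_eq_ediv_of_pos (by norm_num)]; omega
  have hm2 : PySem.Int.mod k 2 = k % 2 := PySem.Int.mod_eq_emod_of_pos (by norm_num)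
  have hm20 : PySem.Int.mod (k * 10 + r) 20 = (k % 2) * 10 + r := by
    rw [PySem.Int.mod_eq_emod_of_pos (by norm_num)]; omega
  unfold cykl_reszty_liczb cykl_reszty_liczb_alt
  dsimp only
  rw [hfd, hm2, hm20]
  rw [range_shift, List.foldl_map]
  simp only [mod10_shift]
  have hk2 : k % 2 = 0 ∨ k % 2 = 1 := by omega
  rcases hk2 with hk | hk <;> rw [hk] <;>
    interval_cases r <;> decide

-- ===== VERDICT (by name: the statement is the Claim_ definition above) =====
theorem cykl_reszty_liczb_spec : Claim_equal_cykl_reszty_liczb := by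
  intro n _
  unfold Spec_cykl_reszty_liczb
  have h := PySem.Int.floordiv_mul_add_mod n 10
  have h0 := PySem.Int.mod_nonneg n (b := 10) (by norm_num)
  have h1 := PySem.Int.mod_lt n (b := 10) (by norm_num)
  have := aux (PySem.Int.floordiv n 10) (PySem.Int.mod n 10) h0 h1
  rwa [h] at this
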